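-- pv_equiv track=rewrite | github.com/blicktz/knowledge_base_repo | dk_rag/utils/validation.py | validate_documents
-- ===== SOURCE A (Python) =====
-- from typing import Dict, Any, List, Optional
--
-- def validate_documents(documents: List[Dict[str, Any]]) -> List[str]:
--     """
--     Validate input documents for persona extraction
--
--     Args:
--         documents: List of document dictionaries
--
--     Returns:
--         List of validation issues
--     """
--     issues = []
--
--     if not documents:
--         issues.append("No documents provided")
--         return issues
--
--     # Check for required fields
--     for i, doc in enumerate(documents):
--         if 'content' not in doc:
--             issues.append(f"Document {i} missing 'content' field")
--         elif not doc['content'].strip():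
--             issues.append(f"Document {i} has empty content")
--
--         if 'source' not in doc:
--             issues.append(f"Document {i} missing 'source' field")
--
--     # Check total content
--     total_words = sum(len(doc.get('content', '').split()) for doc in documents)
--     if total_words < 1000:
--         issues.append(f"Insufficient total content: {total_words} words (minimum 1000)")
--
--     # Check for duplicates
--     content_set = set()
--     for i, doc in enumerate(documents):
--         content = doc.get('content', '')[:100]  # Check first 100 chars
--         if content in content_set:
--             issues.append(f"Document {i} appears to be duplicate")
--         content_set.add(content)
--
--     return issues
-- ===== SOURCE B (Python) =====
-- def validate_documents(documents):
--     """Single-pass validation: one loop accumulates field issues, duplicate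
--     issues and the word total; the result is assembled at the end."""
--     if not documents:
--         return ["No documents provided"]
--     field_issues = []
--     dup_issues = []
--     seen = set()
--     total_words = 0
--     for i, doc in enumerate(documents):
--         if 'content' not in doc:
--             field_issues.append(f"Document {i} missing 'content' field")
--         elif not doc['content'].strip():
--             field_issues.append(f"Document {i} has empty content")
--         if 'source' not in doc:
--             field_issues.append(f"Document {i} missing 'source' field")
--         content = doc.get('content', '')
--         total_words += len(content.split())
--         head = content[:100]
--         if head in seen:
--             dup_issues.append(f"Document {i} appears to be duplicate")
--         seen.add(head)
--     mid = ([f"Insufficient total content: {total_words} words (minimum 1000)"]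
--            if total_words < 1000 else [])
--     return field_issues + mid + dup_issues
-- ===== Notes on version B (the rewrite author's own statement) =====
-- stated objective: alternative
-- what changed: Fuses A's three separate passes over documents (field checks, word-count sum, duplicate scan) into one loop maintaining separate accumulators (field issues, duplicate issues, seen set, running word total), assembling the result afterwards in A's order.
import Mathlib
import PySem

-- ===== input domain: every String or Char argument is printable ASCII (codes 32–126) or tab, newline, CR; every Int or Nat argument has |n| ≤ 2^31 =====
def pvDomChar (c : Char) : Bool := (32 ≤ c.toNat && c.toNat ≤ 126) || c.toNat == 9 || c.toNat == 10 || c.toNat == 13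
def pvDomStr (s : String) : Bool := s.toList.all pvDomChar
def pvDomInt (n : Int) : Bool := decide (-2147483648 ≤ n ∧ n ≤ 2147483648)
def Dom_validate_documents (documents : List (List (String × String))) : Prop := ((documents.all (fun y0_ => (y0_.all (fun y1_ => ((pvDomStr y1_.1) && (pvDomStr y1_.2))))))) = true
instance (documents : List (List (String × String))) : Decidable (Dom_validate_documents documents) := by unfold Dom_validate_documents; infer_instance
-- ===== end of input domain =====

-- B fuses A's three passes over the documents into one loop with separate
-- accumulators (alternative decomposition; return value proved equal).

-- message builders (shared literal f-strings)
def msgMissingContent (i : Int) : String := "Document " ++ PySem.Int.toStr i ++ " missing 'content' field"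
def msgEmptyContent (i : Int) : String := "Document " ++ PySem.Int.toStr i ++ " has empty content"
def msgMissingSource (i : Int) : String := "Document " ++ PySem.Int.toStr i ++ " missing 'source' field"
def msgInsufficient (w : Int) : String := "Insufficient total content: " ++ PySem.Int.toStr w ++ " words (minimum 1000)"
def msgDuplicate (i : Int) : String := "Document " ++ PySem.Int.toStr i ++ " appears to be duplicate"

-- ===== PORT A =====
def validate_documents (documents : List (List (String × String))) : List String :=
  if documents = [] then ["No documents provided"]
  else
    -- first loop: required fields
    let issues := (PySem.List.enumerate documents 0).foldl
      (fun (issues : List String) p =>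
        let i := p.1
        let doc := PySem.Dict.mk p.2
        let issues :=
          if PySem.Dict.contains doc "content" = false then issues ++ [msgMissingContent i]
          else if PySem.Str.strip (PySem.Dict.getD doc "content" "") = "" then issues ++ [msgEmptyContent i]
          else issues
        if PySem.Dict.contains doc "source" = false then issues ++ [msgMissingSource i]
        else issues) []
    -- second pass: total word count
    let total_words : Int :=
      (documents.map (fun doc => ((PySem.Str.split₀ (PySem.Dict.getD (PySem.Dict.mk doc) "content" "")).length : Int))).sum
    let issues := if total_words < 1000 then issues ++ [msgInsufficient total_words] else issues
    -- third loop: duplicates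
    let st := (PySem.List.enumerate documents 0).foldl
      (fun (st : List String × PySem.Set String) p =>
        let content := PySem.Str.slice (PySem.Dict.getD (PySem.Dict.mk p.2) "content" "") none (some 100)
        let issues := if PySem.Set.contains st.2 content then st.1 ++ [msgDuplicate p.1] else st.1
        (issues, PySem.Set.add st.2 content)) (issues, PySem.Set.empty)
    st.1

-- ===== PORT B =====
-- single fused loop state: (field_issues, dup_issues, seen, total_words)
def validate_documents_alt (documents : List (List (String × String))) : List String :=
  if documents = [] then ["No documents provided"]
  else
    let st := (PySem.List.enumerate documents 0).foldl
      (fun (st : List String × List String × PySem.Set String × Int) p =>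
        let (fi, di, seen, tw) := st
        let i := p.1
        let doc := PySem.Dict.mk p.2
        let fi :=
          if PySem.Dict.contains doc "content" = false then fi ++ [msgMissingContent i]
          else if PySem.Str.strip (PySem.Dict.getD doc "content" "") = "" then fi ++ [msgEmptyContent i]
          else fi
        let fi := if PySem.Dict.contains doc "source" = false then fi ++ [msgMissingSource i] else fi
        let content := PySem.Dict.getD doc "content" ""
        let tw := tw + ((PySem.Str.split₀ content).length : Int)
        let head := PySem.Str.slice content none (some 100)
        let di := if PySem.Set.contains seen head then di ++ [msgDuplicate i] else di
        (fi, di, PySem.Set.add seen head, tw)) ([], [], PySem.Set.empty, 0)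
    let (fi, di, _, tw) := st
    let mid := if tw < 1000 then [msgInsufficient tw] else []
    fi ++ mid ++ di

-- ===== PRECONDITION & SPEC =====
def Spec_validate_documents (documents : List (List (String × String))) (out : List String) : Prop := out = validate_documents_alt documents
instance (documents : List (List (String × String))) (out : List String) : Decidable (Spec_validate_documents documents out) := by unfold Spec_validate_documents; infer_instance

-- ===== CLAIM (what is proved, stated in full; the proofs are below) =====
def Claim_equal_validate_documents : Prop := ∀ (documents : List (List (String × String))), Dom_validate_documents documents → Spec_validate_documents documents (validate_documents documents)

-- ===== LEMMAS AND PROOFS =====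

-- canonical per-document field issues
def fIss (i : Int) (doc0 : List (String × String)) : List String :=
  let doc := PySem.Dict.mk doc0
  (if PySem.Dict.contains doc "content" = false then [msgMissingContent i]
   else if PySem.Str.strip (PySem.Dict.getD doc "content" "") = "" then [msgEmptyContent i]
   else []) ++
  (if PySem.Dict.contains doc "source" = false then [msgMissingSource i] else [])

def fieldList (s : Int) : List (List (String × String)) → List String
  | [] => []
  | doc :: rest => fIss s doc ++ fieldList (s + 1) rest

def dupList (seen : PySem.Set String) (s : Int) : List (List (String × String)) → List String
  | [] => []
  | doc :: rest =>
      let c := PySem.Str.slice (PySem.Dict.getD (PySem.Dict.mk doc) "content" "") none (some 100)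
      (if PySem.Set.contains seen c then [msgDuplicate s] else []) ++
      dupList (PySem.Set.add seen c) (s + 1) rest

def wordsOf : List (List (String × String)) → Int
  | [] => 0
  | doc :: rest => ((PySem.Str.split₀ (PySem.Dict.getD (PySem.Dict.mk doc) "content" "")).length : Int) + wordsOf rest

theorem fieldFoldA (l : List (List (String × String))) (s : Int) (acc : List String) :
    (PySem.List.enumerate l s).foldl
      (fun (issues : List String) p =>
        let i := p.1
        let doc := PySem.Dict.mk p.2
        let issues :=
          if PySem.Dict.contains doc "content" = false then issues ++ [msgMissingContent i]
          else if PySem.Str.strip (PySem.Dict.getD doc "content" "") = "" then issues ++ [msgEmptyContent i]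
          else issues
        if PySem.Dict.contains doc "source" = false then issues ++ [msgMissingSource i]
        else issues) acc = acc ++ fieldList s l := by
  induction l generalizing s acc with
  | nil => simp [PySem.List.enumerate_nil, fieldList]
  | cons doc rest ih =>
      rw [PySem.List.enumerate_cons]
      simp only [List.foldl_cons, fieldList, fIss]
      rw [ih]
      split_ifs <;> simp

theorem dupFoldA (l : List (List (String × String))) (s : Int) (acc : List String)
    (seen : PySem.Set String) :
    ((PySem.List.enumerate l s).foldl
      (fun (st : List String × PySem.Set String) p =>
        let content := PySem.Str.slice (PySem.Dict.getD (PySem.Dict.mk p.2) "content" "") none (some 100)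
        let issues := if PySem.Set.contains st.2 content then st.1 ++ [msgDuplicate p.1] else st.1
        (issues, PySem.Set.add st.2 content)) (acc, seen)).1 = acc ++ dupList seen s l := by
  induction l generalizing s acc seen with
  | nil => simp [PySem.List.enumerate_nil, dupList]
  | cons doc rest ih =>
      rw [PySem.List.enumerate_cons]
      simp only [List.foldl_cons, dupList]
      rw [ih]
      split_ifs <;> simp

theorem wordsOf_eq (l : List (List (String × String))) :
    (l.map (fun doc => ((PySem.Str.split₀ (PySem.Dict.getD (PySem.Dict.mk doc) "content" "")).length : Int))).sum
      = wordsOf l := by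
  induction l with
  | nil => simp [wordsOf]
  | cons doc rest ih => simp [wordsOf, ih]

theorem fusedFoldB (l : List (List (String × String))) (s : Int)
    (fi di : List String) (seen : PySem.Set String) (tw : Int) :
    (PySem.List.enumerate l s).foldl
      (fun (st : List String × List String × PySem.Set String × Int) p =>
        let (fi, di, seen, tw) := st
        let i := p.1
        let doc := PySem.Dict.mk p.2
        let fi :=
          if PySem.Dict.contains doc "content" = false then fi ++ [msgMissingContent i]
          else if PySem.Str.strip (PySem.Dict.getD doc "content" "") = "" then fi ++ [msgEmptyContent i]
          else fi
        let fi := if PySem.Dict.contains doc "source" = false then fi ++ [msgMissingSource i] else fi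
        let content := PySem.Dict.getD doc "content" ""
        let tw := tw + ((PySem.Str.split₀ content).length : Int)
        let head := PySem.Str.slice content none (some 100)
        let di := if PySem.Set.contains seen head then di ++ [msgDuplicate i] else di
        (fi, di, PySem.Set.add seen head, tw)) (fi, di, seen, tw)
    = (fi ++ fieldList s l, di ++ dupList seen s l,
       (PySem.List.enumerate l s).foldl (fun se p =>
          PySem.Set.add se (PySem.Str.slice (PySem.Dict.getD (PySem.Dict.mk p.2) "content" "") none (some 100))) seen,
       tw + wordsOf l) := by
  induction l generalizing s fi di seen tw with
  | nil => simp [PySem.List.enumerate_nil, fieldList, dupList, wordsOf]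
  | cons doc rest ih =>
      rw [PySem.List.enumerate_cons]
      simp only [List.foldl_cons, fieldList, dupList, wordsOf, fIss]
      rw [ih]
      split_ifs <;> simp <;> ring

-- ===== VERDICT (by name: the statement is the Claim_ definition above) =====
theorem validate_documents_spec : Claim_equal_validate_documents := by
  intro documents _
  unfold Spec_validate_documents validate_documents validate_documents_alt
  by_cases h : documents = []
  · simp [h]
  · simp only [if_neg h]
    rw [fieldFoldA, fusedFoldB]
    simp only [wordsOf_eq]
    by_cases hw : wordsOf documents < 1000
    · simp only [if_pos hw]
      rw [dupFoldA]
      simp [hw]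
    · simp only [if_neg hw]
      rw [dupFoldA]
      simp [hw]
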